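-- pv_equiv track=rewrite | github.com/gToye/informatica5 | rooster/kleurenpiramide.py | kleuren
-- ===== SOURCE A (Python) =====
-- def kleuren(driehoek):
--     Y = 0
--     G = 0
--     R = 0
--     for i in range(len(driehoek)):
--         Y += driehoek[i].count('Y')
--         R += driehoek[i].count('R')
--         G += driehoek[i].count('G')
--     return(G,R,Y)
-- ===== SOURCE B (Python) =====
-- def kleuren(driehoek):
--     # Sort all characters once, then find each colour's contiguous block
--     # by binary search; the block width is the count.
--     s = sorted("".join(driehoek))
--     n = len(s)
--
--     def left(ch):
--         lo, hi = 0, n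
--         while lo < hi:
--             mid = (lo + hi) // 2
--             if s[mid] < ch:
--                 lo = mid + 1
--             else:
--                 hi = mid
--         return lo
--
--     def right(ch):
--         lo, hi = 0, n
--         while lo < hi:
--             mid = (lo + hi) // 2
--             if ch < s[mid]:
--                 hi = mid
--             else:
--                 lo = mid + 1
--         return lo
--
--     return (right('G') - left('G'), right('R') - left('R'), right('Y') - left('Y'))
-- ===== Notes on version B (the rewrite author's own statement) =====
-- stated objective: alternative
-- what changed: A sums three substring .count scans per row; B sorts the concatenation of all rows once and then locates each colour's contiguous block with hand-written binary searches (bisect-left/right), returning the block widths.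
import Mathlib
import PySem

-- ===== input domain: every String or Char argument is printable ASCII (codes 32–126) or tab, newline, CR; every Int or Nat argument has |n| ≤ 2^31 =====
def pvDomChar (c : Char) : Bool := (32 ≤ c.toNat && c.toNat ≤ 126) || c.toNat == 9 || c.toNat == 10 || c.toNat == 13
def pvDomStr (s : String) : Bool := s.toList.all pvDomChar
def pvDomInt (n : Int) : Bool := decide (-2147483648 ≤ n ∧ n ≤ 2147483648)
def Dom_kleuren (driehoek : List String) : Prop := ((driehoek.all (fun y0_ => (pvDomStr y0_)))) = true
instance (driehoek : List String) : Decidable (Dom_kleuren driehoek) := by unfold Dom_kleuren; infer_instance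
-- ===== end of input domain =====

-- B replaces A's three per-row substring scans by one sort of all characters plus binary
-- searches for each colour's block; alternative algorithm, not claimed faster.

-- ===== PORT A =====
-- literal port of A: index loop over range(len(driehoek)), three .count scans per row, state (Y, G, R)
def kleuren (driehoek : List String) : Int × Int × Int :=
  let st : Int × Int × Int :=
    (PySem.List.pyRange 0 (PySem.List.len driehoek) 1).foldl
      (fun (s : Int × Int × Int) i =>
        (s.1 + (PySem.Str.count (PySem.List.pyGetD driehoek i "") "Y" : Int),
         s.2.1 + (PySem.Str.count (PySem.List.pyGetD driehoek i "") "G" : Int),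
         s.2.2 + (PySem.Str.count (PySem.List.pyGetD driehoek i "") "R" : Int)))
      (0, 0, 0)
  (st.2.1, st.2.2, st.1)

-- ===== PORT B =====
-- Source B's `left(ch)` loop: lo/hi halving; every index probed satisfies mid < hi ≤ len s,
-- so the getD default is never read (Python s[mid] never raises here)
def bsLeft (s : List Char) (ch : Char) (lo hi : Nat) : Nat :=
  if h : lo < hi then
    let mid := (lo + hi) / 2
    if s.getD mid ch < ch then bsLeft s ch (mid + 1) hi
    else bsLeft s ch lo mid
  else lo
termination_by hi - lo
decreasing_by all_goals omega

-- Source B's `right(ch)` loop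
def bsRight (s : List Char) (ch : Char) (lo hi : Nat) : Nat :=
  if h : lo < hi then
    let mid := (lo + hi) / 2
    if ch < s.getD mid ch then bsRight s ch lo mid
    else bsRight s ch (mid + 1) hi
  else lo
termination_by hi - lo
decreasing_by all_goals omega

-- literal port of B: sort the characters of "".join(driehoek), then three block widths
def kleuren_alt (driehoek : List String) : Int × Int × Int :=
  let s := PySem.List.sorted (PySem.Str.join "" driehoek).toList (fun c => c) false
  let n := s.length
  ((bsRight s 'G' 0 n : Int) - (bsLeft s 'G' 0 n : Int),
   (bsRight s 'R' 0 n : Int) - (bsLeft s 'R' 0 n : Int),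
   (bsRight s 'Y' 0 n : Int) - (bsLeft s 'Y' 0 n : Int))

-- ===== PRECONDITION & SPEC =====
def Spec_kleuren (driehoek : List String) (out : Int × Int × Int) : Prop := out = kleuren_alt driehoek
instance (driehoek : List String) (out : Int × Int × Int) : Decidable (Spec_kleuren driehoek out) := by unfold Spec_kleuren; infer_instance

-- ===== CLAIM =====
def Claim_equal_kleuren : Prop := ∀ (driehoek : List String), Dom_kleuren driehoek → Spec_kleuren driehoek (kleuren driehoek)

-- ===== LEMMAS AND PROOFS =====

-- Python s.count(sub) for a one-character sub is the character count
theorem go_single (v : Char) (l : List Char) (acc : Nat) :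
    PySem.Chars.count.go [v] l.length l acc = acc + l.count v := by
  induction l generalizing acc with
  | nil => simp [PySem.Chars.count.go]
  | cons h t ih =>
    show PySem.Chars.count.go [v] (t.length + 1) (h :: t) acc = _
    rw [PySem.Chars.count.go]
    by_cases hv : h = v
    · simp [hv, List.isPrefixOf, ih]
      omega
    · simp [List.isPrefixOf, hv, ih, Ne.symm hv]

theorem chars_count_single (cs : List Char) (v : Char) :
    PySem.Chars.count cs [v] = cs.count v := by
  simp [PySem.Chars.count, go_single]

-- A's index loop, rewritten as a fold over the rows, accumulates the three counts
theorem kleuren_fold (l : List String) (s : Int × Int × Int) :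
    l.foldl
      (fun (s : Int × Int × Int) rij =>
        (s.1 + (PySem.Str.count rij "Y" : Int),
         s.2.1 + (PySem.Str.count rij "G" : Int),
         s.2.2 + (PySem.Str.count rij "R" : Int))) s
    = (s.1 + ((l.map String.toList).flatten.count 'Y' : Int),
       s.2.1 + ((l.map String.toList).flatten.count 'G' : Int),
       s.2.2 + ((l.map String.toList).flatten.count 'R' : Int)) := by
  induction l generalizing s with
  | nil => simp
  | cons x xs ih =>
    simp only [List.foldl_cons, List.map_cons, List.flatten_cons, List.count_append]
    rw [ih]
    have hY : "Y".toList = ['Y'] := rfl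
    have hG : "G".toList = ['G'] := rfl
    have hR : "R".toList = ['R'] := rfl
    simp only [PySem.Str.count_eq, hY, hG, hR, chars_count_single, Prod.mk.injEq]
    push_cast
    refine ⟨by ring, by ring, by ring⟩

-- a list split by an index r into a true prefix and a false suffix has countP = r
theorem countP_split (s : List Char) (p : Char → Bool) (r : Nat) (hr : r ≤ s.length)
    (h1 : ∀ j (_ : j < s.length), j < r → p s[j])
    (h2 : ∀ j (hj : j < s.length), r ≤ j → ¬ p s[j]) : s.countP p = r := by
  conv_lhs => rw [← List.take_append_drop r s]
  rw [List.countP_append]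
  have ht : (s.take r).countP p = (s.take r).length := by
    apply List.countP_eq_length.mpr
    intro a ha
    obtain ⟨i, hi, hia⟩ := List.mem_iff_getElem.mp ha
    have hlen : (s.take r).length = r := by simp [Nat.min_eq_left hr]
    have hir : i < r := by omega
    have : i < s.length := by omega
    rw [← hia, List.getElem_take]
    exact h1 i this hir
  have hd : (s.drop r).countP p = 0 := by
    apply List.countP_eq_zero.mpr
    intro a ha
    obtain ⟨i, hi, hia⟩ := List.mem_iff_getElem.mp ha
    have hlen : (s.drop r).length = s.length - r := by simp
    have : r + i < s.length := by omega
    rw [← hia, List.getElem_drop]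
    exact h2 (r + i) this (by omega)
  rw [ht, hd]
  simp [Nat.min_eq_left hr]

-- binary-search invariant for bsLeft on a sorted list
theorem bsLeft_inv (s : List Char) (ch : Char)
    (hs : s.Pairwise (· ≤ ·)) :
    ∀ (fuel lo hi : Nat), hi - lo ≤ fuel → lo ≤ hi → hi ≤ s.length →
    (∀ j (_ : j < s.length), j < lo → s[j] < ch) →
    (∀ j (hj : j < s.length), hi ≤ j → ¬ s[j] < ch) →
    lo ≤ bsLeft s ch lo hi ∧ bsLeft s ch lo hi ≤ hi ∧
    (∀ j (_ : j < s.length), j < bsLeft s ch lo hi → s[j] < ch) ∧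
    (∀ j (hj : j < s.length), bsLeft s ch lo hi ≤ j → ¬ s[j] < ch) := by
  intro fuel
  induction fuel with
  | zero =>
    intro lo hi hf hle hhi hlow hhigh
    have heq : lo = hi := by omega
    rw [bsLeft, dif_neg (by omega : ¬ lo < hi)]
    subst heq
    exact ⟨Nat.le_refl _, Nat.le_refl _, hlow, hhigh⟩
  | succ n ih =>
    intro lo hi hf hle hhi hlow hhigh
    rw [bsLeft]
    by_cases h : lo < hi
    · simp only [h, dif_pos]
      have hmidlt : (lo + hi) / 2 < hi := by omega
      have hmidge : lo ≤ (lo + hi) / 2 := by omega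
      have hmids : (lo + hi) / 2 < s.length := by omega
      have hget : s.getD ((lo + hi) / 2) ch = s[(lo + hi) / 2] := List.getD_eq_getElem s ch hmids
      rw [hget]
      have hsorted : ∀ p q (hp : p < s.length) (hq : q < s.length), p ≤ q → s[p] ≤ s[q] := by
        intro p q hp hq hpq
        rcases Nat.lt_or_ge p q with hlt | hge
        · exact (List.pairwise_iff_getElem.mp hs) p q hp hq hlt
        · have : p = q := by omega
          subst this; exact le_refl _
      by_cases hc : s[(lo + hi) / 2] < ch
      · simp only [hc, if_pos]
        obtain ⟨a, b, c, d⟩ := ih ((lo + hi) / 2 + 1) hi (by omega) (by omega) hhi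
          (fun j hj hjlt => lt_of_le_of_lt (hsorted j ((lo + hi) / 2) hj hmids (by omega)) hc)
          hhigh
        exact ⟨by omega, b, c, d⟩
      · simp only [hc, ite_false]
        obtain ⟨a, b, c, d⟩ := ih lo ((lo + hi) / 2) (by omega) (by omega) (by omega) hlow
          (fun j hj hjge hlt =>
            hc (lt_of_le_of_lt (hsorted ((lo + hi) / 2) j hmids hj hjge) hlt))
        exact ⟨a, by omega, c, d⟩
    · rw [dif_neg h]
      have heq : lo = hi := by omega
      subst heq
      exact ⟨le_refl _, le_refl _, hlow, hhigh⟩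

theorem bsRight_inv (s : List Char) (ch : Char)
    (hs : s.Pairwise (· ≤ ·)) :
    ∀ (fuel lo hi : Nat), hi - lo ≤ fuel → lo ≤ hi → hi ≤ s.length →
    (∀ j (_ : j < s.length), j < lo → s[j] ≤ ch) →
    (∀ j (hj : j < s.length), hi ≤ j → ¬ s[j] ≤ ch) →
    lo ≤ bsRight s ch lo hi ∧ bsRight s ch lo hi ≤ hi ∧
    (∀ j (_ : j < s.length), j < bsRight s ch lo hi → s[j] ≤ ch) ∧
    (∀ j (hj : j < s.length), bsRight s ch lo hi ≤ j → ¬ s[j] ≤ ch) := by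
  intro fuel
  induction fuel with
  | zero =>
    intro lo hi hf hle hhi hlow hhigh
    have heq : lo = hi := by omega
    rw [bsRight, dif_neg (by omega : ¬ lo < hi)]
    subst heq
    exact ⟨Nat.le_refl _, Nat.le_refl _, hlow, hhigh⟩
  | succ n ih =>
    intro lo hi hf hle hhi hlow hhigh
    rw [bsRight]
    by_cases h : lo < hi
    · simp only [h, dif_pos]
      have hmidlt : (lo + hi) / 2 < hi := by omega
      have hmidge : lo ≤ (lo + hi) / 2 := by omega
      have hmids : (lo + hi) / 2 < s.length := by omega
      have hget : s.getD ((lo + hi) / 2) ch = s[(lo + hi) / 2] := List.getD_eq_getElem s ch hmids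
      rw [hget]
      have hsorted : ∀ p q (hp : p < s.length) (hq : q < s.length), p ≤ q → s[p] ≤ s[q] := by
        intro p q hp hq hpq
        rcases Nat.lt_or_ge p q with hlt | hge
        · exact (List.pairwise_iff_getElem.mp hs) p q hp hq hlt
        · have : p = q := by omega
          subst this; exact le_refl _
      by_cases hc : ch < s[(lo + hi) / 2]
      · simp only [hc, if_pos]
        obtain ⟨a, b, c, d⟩ := ih lo ((lo + hi) / 2) (by omega) (by omega) (by omega) hlow
          (fun j hj hjge hle' =>
            absurd (lt_of_le_of_lt hle' hc) (not_lt.mpr (hsorted ((lo + hi) / 2) j hmids hj hjge)))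
        exact ⟨a, by omega, c, d⟩
      · simp only [hc, ite_false]
        obtain ⟨a, b, c, d⟩ := ih ((lo + hi) / 2 + 1) hi (by omega) (by omega) hhi
          (fun j hj hjlt =>
            le_trans (hsorted j ((lo + hi) / 2) hj hmids (by omega)) (not_lt.mp hc))
          hhigh
        exact ⟨by omega, b, c, d⟩
    · rw [dif_neg h]
      have heq : lo = hi := by omega
      subst heq
      exact ⟨le_refl _, le_refl _, hlow, hhigh⟩

-- countP(≤ ch) splits into countP(< ch) plus the exact count
theorem countP_le_split (s : List Char) (ch : Char) :
    s.countP (fun c => decide (c ≤ ch))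
      = s.countP (fun c => decide (c < ch)) + s.count ch := by
  induction s with
  | nil => simp
  | cons x t iht =>
    simp only [List.countP_cons, List.count_cons]
    rw [iht]
    rcases lt_trichotomy x ch with hx | hx | hx
    · simp [hx, le_of_lt hx, ne_of_lt hx]
      omega
    · subst hx; simp; omega
    · simp [not_le.mpr hx, not_lt.mpr (le_of_lt hx), ne_of_gt hx]

-- block width = count, for a sorted list
theorem bs_count (s : List Char) (ch : Char) (hs : s.Pairwise (· ≤ ·)) :
    (bsRight s ch 0 s.length : Int) - (bsLeft s ch 0 s.length : Int) = (s.count ch : Int) := by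
  obtain ⟨_, hLhi, hL1, hL2⟩ := bsLeft_inv s ch hs s.length 0 s.length (by omega) (by omega)
    (le_refl _) (by intro j _ h; omega) (by intro j hj h; omega)
  obtain ⟨_, hRhi, hR1, hR2⟩ := bsRight_inv s ch hs s.length 0 s.length (by omega) (by omega)
    (le_refl _) (by intro j _ h; omega) (by intro j hj h; omega)
  have hle : s.countP (fun c => decide (c < ch)) = bsLeft s ch 0 s.length :=
    countP_split s _ _ hLhi (fun j hj hjr => decide_eq_true (hL1 j hj hjr))
      (fun j hj hjr hd => hL2 j hj hjr (of_decide_eq_true hd))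
  have hri : s.countP (fun c => decide (c ≤ ch)) = bsRight s ch 0 s.length :=
    countP_split s _ _ hRhi (fun j hj hjr => decide_eq_true (hR1 j hj hjr))
      (fun j hj hjr hd => hR2 j hj hjr (of_decide_eq_true hd))
  rw [← hle, ← hri, countP_le_split s ch]
  push_cast
  ring

-- "".join concatenates: joining with the empty separator is flatten
theorem join_nil_flatten (l : List (List Char)) :
    PySem.Chars.join [] l = l.flatten := by
  show (List.intersperse ([]:List Char) l).flatten = l.flatten
  induction l with
  | nil => rfl
  | cons x xs ih =>
    cases xs with
    | nil => rfl
    | cons y ys =>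
      show (x :: [] :: List.intersperse [] (y :: ys)).flatten = _
      simp only [List.flatten_cons] at *
      rw [ih]
      simp

-- B's sorted character list has the same counts as the concatenation of the rows
theorem sorted_join_count (driehoek : List String) (v : Char) :
    ((PySem.List.sorted (PySem.Str.join "" driehoek).toList (fun c => c) false).count v : Int)
      = ((driehoek.map String.toList).flatten.count v : Int) := by
  rw [(PySem.List.sorted_perm (PySem.Str.join "" driehoek).toList (fun c => c) false).count_eq]
  rw [PySem.Str.toList_join]
  rw [show "".toList = ([] : List Char) from rfl, join_nil_flatten]

-- ===== VERDICT =====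
theorem kleuren_spec : Claim_equal_kleuren := by
  intro driehoek _
  unfold Spec_kleuren kleuren kleuren_alt
  rw [PySem.List.foldl_pyRange_zero_pyGetD driehoek ""
      (fun (s : Int × Int × Int) rij =>
        (s.1 + (PySem.Str.count rij "Y" : Int),
         s.2.1 + (PySem.Str.count rij "G" : Int),
         s.2.2 + (PySem.Str.count rij "R" : Int))) (0,0,0)]
  rw [kleuren_fold]
  have hs : (PySem.List.sorted (PySem.Str.join "" driehoek).toList (fun c => c) false).Pairwise (· ≤ ·) :=
    PySem.List.sorted_pairwise (PySem.Str.join "" driehoek).toList (fun c => c)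
  simp only [bs_count _ _ hs, sorted_join_count]
  norm_num
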